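-- pv_equiv track=rewrite | github.com/vvatsaraj09/Meta_Coding_Puzzles | Level 2/Scoreboard_Inference_2.py | getMinProblemCount
-- ===== SOURCE A (Python) =====
-- from typing import List
--
-- def getMinProblemCount(N: int, S: List[int]) -> int:
--   S = list(set(S))
--   one, mandatory_one, mandatory_two, maxer, maxer_2 = False, False, False, 0, 0
--   for a in S:
--     if a == 1:
--       one = True
--       mandatory_one = True
--     elif a%3 == 1:
--       mandatory_one = True
--     elif a%3 == 2:
--       mandatory_two = True
--     if a>=maxer:
--       maxer, maxer_2 = a, maxer
--     elif a>maxer_2: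
--       maxer_2 = a
--   ans = (maxer//3)
--   if mandatory_one:
--     ans+=1
--   if mandatory_two:
--     ans+=1
--   if maxer%3 == 0 and mandatory_one and mandatory_two:
--     ans-=1
--   if maxer%3 == 1 and maxer_2+1!=maxer and not one and mandatory_one:
--     ans-=1
--   return ans
-- ===== SOURCE B (Python) =====
-- from typing import List
--
-- def getMinProblemCount(N: int, S: List[int]) -> int:
--   distinct = set(S)
--   s = sorted(distinct, reverse=True)
--   maxer = s[0] if s and s[0] > 0 else 0
--   maxer_2 = s[1] if len(s) > 1 and s[1] > 0 else 0
--   residues = {a % 3 for a in distinct}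
--   extras = (1 in residues) + (2 in residues)
--   ans = maxer // 3 + extras
--   if maxer % 3 == 0:
--     if extras == 2:
--       ans -= 1
--   elif maxer % 3 == 1 and 1 not in distinct and maxer_2 + 1 != maxer:
--     ans -= 1
--   return ans
-- ===== Notes on version B (the rewrite author's own statement) =====
-- stated objective: alternative
-- what changed: Instead of A's single five-variable running scan, B sorts the distinct scores descending and reads the top two by position, derives the flags from the set of mod-3 residues, and replaces A's four independent adjustment ifs by an exclusive branch on maxer%3 with the redundant mandatory_one test dropped (it is implied when maxer%3==1 and 1 is absent).
import Mathlib
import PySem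

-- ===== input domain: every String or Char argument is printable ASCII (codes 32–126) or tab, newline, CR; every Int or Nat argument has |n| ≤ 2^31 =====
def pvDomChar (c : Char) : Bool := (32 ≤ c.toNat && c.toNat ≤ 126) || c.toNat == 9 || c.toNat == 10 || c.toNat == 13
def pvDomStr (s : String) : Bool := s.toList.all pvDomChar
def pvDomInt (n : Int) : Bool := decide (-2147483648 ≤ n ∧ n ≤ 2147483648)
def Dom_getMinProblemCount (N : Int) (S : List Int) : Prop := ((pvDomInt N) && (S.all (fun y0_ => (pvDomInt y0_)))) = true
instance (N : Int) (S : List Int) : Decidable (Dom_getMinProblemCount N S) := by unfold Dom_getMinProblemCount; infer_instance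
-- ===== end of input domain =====

-- B replaces A's single five-variable running scan by: sort the distinct scores descending and
-- read the top two positionally, take the flags from the set of mod-3 residues, and decide the
-- final adjustments by an exclusive branch on maxer%3 (objective: alternative decomposition).

-- ===== PORT A =====
-- the body of A's 'for a in S' loop: flag if/elif chain, then the running top-two update
def pvStepA (st : Bool × Bool × Bool × Int × Int) (a : Int) : Bool × Bool × Bool × Int × Int :=
  let f := if a == 1 then (true, true, st.2.2.1)
           else if PySem.Int.mod a 3 == 1 then (st.1, true, st.2.2.1)
           else if PySem.Int.mod a 3 == 2 then (st.1, st.2.1, true)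
           else (st.1, st.2.1, st.2.2.1)
  let m := if st.2.2.2.1 ≤ a then (a, st.2.2.2.1)
           else if st.2.2.2.2 < a then (st.2.2.2.1, a)
           else (st.2.2.2.1, st.2.2.2.2)
  (f.1, f.2.1, f.2.2, m.1, m.2)

def getMinProblemCount (N : Int) (S : List Int) : Int :=
  let Sd : PySem.Set Int := PySem.Set.ofList S
  let st := Sd.foldl pvStepA (false, false, false, 0, 0)
  let one := st.1
  let mandatoryOne := st.2.1
  let mandatoryTwo := st.2.2.1
  let maxer := st.2.2.2.1
  let maxer2 := st.2.2.2.2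
  let ans := PySem.Int.floordiv maxer 3
  let ans := if mandatoryOne then ans + 1 else ans
  let ans := if mandatoryTwo then ans + 1 else ans
  let ans := if PySem.Int.mod maxer 3 == 0 && mandatoryOne && mandatoryTwo then ans - 1 else ans
  let ans := if PySem.Int.mod maxer 3 == 1 && !(maxer2 + 1 == maxer) && !one && mandatoryOne then ans - 1 else ans
  ans

-- ===== PORT B =====
-- 's[0] if s and s[0] > 0 else 0'
def pvTop (s : List Int) : Int :=
  match s with | [] => 0 | x :: _ => if 0 < x then x else 0
-- 's[1] if len(s) > 1 and s[1] > 0 else 0'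
def pvTop2 (s : List Int) : Int :=
  match s with | _ :: y :: _ => if 0 < y then y else 0 | _ => 0

def getMinProblemCount_alt (N : Int) (S : List Int) : Int :=
  let distinct : PySem.Set Int := PySem.Set.ofList S
  let s := PySem.List.sorted distinct (fun x => x) true
  let maxer := pvTop s
  let maxer2 := pvTop2 s
  let residues : PySem.Set Int := PySem.Set.ofList (distinct.map (fun a => PySem.Int.mod a 3))
  let extras : Int := (if PySem.Set.contains residues 1 then 1 else 0) +
                      (if PySem.Set.contains residues 2 then 1 else 0)
  let ans := PySem.Int.floordiv maxer 3 + extras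
  if PySem.Int.mod maxer 3 == 0 then (if extras == 2 then ans - 1 else ans)
  else if PySem.Int.mod maxer 3 == 1 && !(PySem.Set.contains distinct 1) && !(maxer2 + 1 == maxer) then ans - 1
  else ans

-- ===== PRECONDITION & SPEC =====
def Spec_getMinProblemCount (N : Int) (S : List Int) (out : Int) : Prop := out = getMinProblemCount_alt N S
instance (N : Int) (S : List Int) (out : Int) : Decidable (Spec_getMinProblemCount N S out) := by unfold Spec_getMinProblemCount; infer_instance

-- ===== CLAIM (what is proved, stated in full; the proofs are below) =====
def Claim_equal_getMinProblemCount : Prop := ∀ (N : Int) (S : List Int), Dom_getMinProblemCount N S → Spec_getMinProblemCount N S (getMinProblemCount N S)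

-- ===== LEMMAS AND PROOFS =====

-- max(0, sup L): the value A's running max computes
def pvMx (L : List Int) : Int := L.foldl max 0

lemma pvMx_nonneg (L : List Int) : 0 ≤ pvMx L := (PySem.List.le_foldl_max L 0).1

lemma pvMx_ge (L : List Int) : ∀ a ∈ L, a ≤ pvMx L := (PySem.List.le_foldl_max L 0).2

lemma pvMx_le (L : List Int) (b : Int) (h0 : 0 ≤ b) (h : ∀ a ∈ L, a ≤ b) : pvMx L ≤ b := by
  rcases PySem.List.foldl_max_mem L 0 with h' | h'
  · rw [pvMx, h']; exact h0
  · exact h _ h'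

lemma pvMx_append_singleton (L : List Int) (a : Int) : pvMx (L ++ [a]) = max (pvMx L) a := by
  simp [pvMx, List.foldl_append]

lemma pvMx_perm (L M : List Int) (h : L.Perm M) : pvMx L = pvMx M := by
  apply le_antisymm
  · exact pvMx_le _ _ (pvMx_nonneg M) (fun a ha => pvMx_ge M a (h.mem_iff.mp ha))
  · exact pvMx_le _ _ (pvMx_nonneg L) (fun a ha => pvMx_ge L a (h.mem_iff.mpr ha))

-- characterisation of A's whole loop state on a duplicate-free list
lemma pvStepA_flags (one m1 m2 : Bool) (mx mx2 : Int) (a : Int) :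
    (pvStepA (one, m1, m2, mx, mx2) a).1 = (one || (a == 1)) ∧
    (pvStepA (one, m1, m2, mx, mx2) a).2.1 = (m1 || (PySem.Int.mod a 3 == 1)) ∧
    (pvStepA (one, m1, m2, mx, mx2) a).2.2.1 = (m2 || (PySem.Int.mod a 3 == 2)) := by
  have hmod : PySem.Int.mod a 3 = a % 3 := PySem.Int.mod_eq_emod_of_pos (by norm_num)
  by_cases h1 : a = 1
  · subst h1; simp [pvStepA]
  · by_cases hm1 : a % 3 = 1
    · simp [pvStepA, h1, hm1]
    · by_cases hm2 : a % 3 = 2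
      · simp [pvStepA, h1, hm2]
      · simp [pvStepA, h1, hm1, hm2]

lemma pvScanA (L : List Int) (hnd : L.Nodup) :
    L.foldl pvStepA (false, false, false, (0 : Int), (0 : Int)) =
      (L.any (fun a => a == 1),
       L.any (fun a => PySem.Int.mod a 3 == 1),
       L.any (fun a => PySem.Int.mod a 3 == 2),
       pvMx L,
       pvMx (L.filter (fun a => decide (a < pvMx L)))) := by
  induction L using List.reverseRecOn with
  | nil => rfl
  | append_singleton L a ih =>
    have hnd' : L.Nodup := hnd.of_append_left
    have hna : a ∉ L := by
      have h := (List.nodup_append.mp hnd).2.2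
      intro hmem
      exact h a hmem a (by simp) rfl
    rw [List.foldl_append, ih hnd', List.foldl_cons, List.foldl_nil]
    obtain ⟨e1, e2, e3⟩ := pvStepA_flags (L.any fun b => b == 1)
      (L.any fun b => PySem.Int.mod b 3 == 1) (L.any fun b => PySem.Int.mod b 3 == 2)
      (pvMx L) (pvMx (L.filter fun b => decide (b < pvMx L))) a
    have hL : ∀ b ∈ L, b ≤ pvMx L := pvMx_ge L
    by_cases hM : pvMx L ≤ a
    · -- a becomes the new max; every element of L is strictly below a
      have hlt : ∀ b ∈ L, b < a := by
        intro b hb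
        rcases lt_or_eq_of_le (le_trans (hL b hb) hM) with h | h
        · exact h
        · exact absurd (h ▸ hb) hna
      have hmaxa : max (pvMx L) a = a := max_eq_right hM
      have hfilter : (L ++ [a]).filter (fun b => decide (b < a)) = L := by
        rw [List.filter_append]
        have h2 : [a].filter (fun b => decide (b < a)) = [] := by simp
        rw [h2, List.append_nil, List.filter_eq_self.mpr (by intro b hb; simpa using hlt b hb)]
      rw [pvMx_append_singleton, hmaxa, hfilter]
      refine Prod.ext ?_ (Prod.ext ?_ (Prod.ext ?_ (Prod.ext ?_ ?_)))
      · rw [e1]; simp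
      · rw [e2]; simp
      · rw [e3]; simp
      · simp [pvStepA, hM]
      · simp [pvStepA, hM]
    · -- max unchanged; a enters the second-max competition
      have haM : a < pvMx L := by omega
      have hmaxa : max (pvMx L) a = pvMx L := max_eq_left (le_of_lt haM)
      have hfilter : (L ++ [a]).filter (fun b => decide (b < pvMx L)) =
          L.filter (fun b => decide (b < pvMx L)) ++ [a] := by
        rw [List.filter_append]; simp [haM]
      rw [pvMx_append_singleton, hmaxa, hfilter, pvMx_append_singleton]
      refine Prod.ext ?_ (Prod.ext ?_ (Prod.ext ?_ (Prod.ext ?_ ?_)))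
      · rw [e1]; simp
      · rw [e2]; simp
      · rw [e3]; simp
      · simp only [pvStepA]; rw [if_neg hM]; split <;> rfl
      · by_cases h2 : pvMx (L.filter (fun b => decide (b < pvMx L))) < a
        · simp [pvStepA, hM, h2, max_eq_right (le_of_lt h2)]
        · simp [pvStepA, hM, h2, max_eq_left (not_lt.mp h2)]

-- the descending sorted distinct list is strictly decreasing
lemma pvSorted_pairwise_gt (S : List Int) :
    (PySem.List.sorted (PySem.Set.ofList S) (fun x => x) true).Pairwise (fun a b => b < a) := by
  have hperm := PySem.List.sorted_perm (PySem.Set.ofList S) (fun x : Int => x) true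
  have hnd : (PySem.List.sorted (PySem.Set.ofList S) (fun x : Int => x) true).Nodup :=
    hperm.nodup_iff.mpr (PySem.Set.nodup_ofList S)
  have hpw := PySem.List.sorted_pairwise_rev (PySem.Set.ofList S) (fun x : Int => x)
  exact (hpw.and hnd).imp (fun h => lt_of_le_of_ne h.1 (Ne.symm h.2))

lemma pvMx_nonpos (L : List Int) (h : ∀ a ∈ L, a ≤ 0) : pvMx L = 0 :=
  le_antisymm (pvMx_le L 0 le_rfl h) (pvMx_nonneg L)

-- the head of a strictly decreasing rearrangement, clamped at 0, is the running max
lemma pvHead (L : List Int) (x : Int) (r : List Int)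
    (hperm : (x :: r).Perm L) (hpw : (x :: r).Pairwise (fun a b => b < a)) :
    pvMx L = if 0 < x then x else 0 := by
  have hhd : ∀ b ∈ r, b < x := (List.pairwise_cons.mp hpw).1
  have hub : ∀ b ∈ L, b ≤ x := by
    intro b hb
    rcases List.mem_cons.mp (hperm.mem_iff.mpr hb) with h | h
    · exact le_of_eq h
    · exact le_of_lt (hhd b h)
  by_cases hx : 0 < x
  · rw [if_pos hx]
    exact le_antisymm (pvMx_le L x (le_of_lt hx) hub)
      (pvMx_ge L x (hperm.mem_iff.mp (List.mem_cons_self)))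
  · rw [if_neg hx]
    exact pvMx_nonpos L (fun a ha => le_trans (hub a ha) (by omega))

-- head of the descending sorted distinct list, clamped at 0, is A's running max
lemma pvTop_sorted (S : List Int) :
    pvTop (PySem.List.sorted (PySem.Set.ofList S) (fun x => x) true) = pvMx (PySem.Set.ofList S) := by
  have hperm := PySem.List.sorted_perm (PySem.Set.ofList S) (fun x : Int => x) true
  have hpw := pvSorted_pairwise_gt S
  cases ht : PySem.List.sorted (PySem.Set.ofList S) (fun x => x) true with
  | nil =>
    rw [ht] at hperm
    rw [hperm.symm.eq_nil]
    rfl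
  | cons x r =>
    rw [ht] at hperm hpw
    rw [pvHead _ x r hperm hpw]
    rfl

-- second element, clamped at 0, is A's running second max
lemma pvTop2_sorted (S : List Int) :
    pvTop2 (PySem.List.sorted (PySem.Set.ofList S) (fun x => x) true) =
      pvMx ((PySem.Set.ofList S).filter (fun a => decide (a < pvMx (PySem.Set.ofList S)))) := by
  have hperm := PySem.List.sorted_perm (PySem.Set.ofList S) (fun x : Int => x) true
  have hpw := pvSorted_pairwise_gt S
  cases ht : PySem.List.sorted (PySem.Set.ofList S) (fun x => x) true with
  | nil =>
    rw [ht] at hperm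
    rw [hperm.symm.eq_nil]
    rfl
  | cons x r =>
    rw [ht] at hperm hpw
    have hM := pvHead _ x r hperm hpw
    have hhd : ∀ b ∈ r, b < x := (List.pairwise_cons.mp hpw).1
    by_cases hx : 0 < x
    · have hMx : pvMx (PySem.Set.ofList S) = x := by rw [hM, if_pos hx]
      rw [hMx]
      have hfil : (PySem.Set.ofList S).filter (fun a => decide (a < x)) |>.Perm r := by
        have h1 := (hperm.filter (fun a => decide (a < x))).symm
        have h2 : (x :: r).filter (fun a => decide (a < x)) = r := by
          rw [List.filter_cons_of_neg (by simp)]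
          exact List.filter_eq_self.mpr (fun b hb => by simpa using hhd b hb)
        rwa [h2] at h1
      rw [pvMx_perm _ _ hfil]
      cases r with
      | nil => rfl
      | cons y r' =>
        rw [pvHead _ y r' (List.Perm.refl _) (List.pairwise_cons.mp hpw).2]
        rfl
    · have hM0 : pvMx (PySem.Set.ofList S) = 0 := by rw [hM, if_neg hx]
      rw [hM0, pvMx_nonpos _ (fun a ha => by
        have := (List.mem_filter.mp ha).2
        simp only [decide_eq_true_eq] at this
        omega)]
      cases r with
      | nil => rfl
      | cons y r' =>
        have hy : ¬ 0 < y := by have := hhd y (by simp); omega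
        simp [pvTop2, hy]

-- membership in the residue set is the residue flag
lemma pvResidues (S : List Int) (k : Int) :
    PySem.Set.contains (PySem.Set.ofList ((PySem.Set.ofList S).map (fun a => PySem.Int.mod a 3))) k =
      (PySem.Set.ofList S).any (fun a => PySem.Int.mod a 3 == k) := by
  rw [Bool.eq_iff_iff]
  simp [PySem.Set.mem_ofList, List.mem_map, List.any_eq_true]

lemma pvContainsOne (S : List Int) :
    PySem.Set.contains (PySem.Set.ofList S) 1 = (PySem.Set.ofList S).any (fun a => a == 1) := by
  rw [Bool.eq_iff_iff]
  simp [List.any_eq_true]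

-- if the max has residue 1 it is itself a witness for mandatory_one
lemma pvM1 (L : List Int) (h : PySem.Int.mod (pvMx L) 3 = 1) :
    L.any (fun a => PySem.Int.mod a 3 == 1) = true := by
  unfold pvMx at h
  rw [PySem.Int.mod_eq_emod_of_pos (by norm_num)] at h
  rcases PySem.List.foldl_max_mem L 0 with hmem | hmem
  · exfalso; rw [hmem] at h; revert h; decide
  · exact List.any_eq_true.mpr ⟨_, hmem, by simp [PySem.Int.mod_eq_emod_of_pos, h]⟩

-- the two adjustment chains agree
lemma pvFinal (M M2 : Int) (one m1 m2 : Bool)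
    (hm1 : PySem.Int.mod M 3 = 1 → m1 = true) :
    (let ans := PySem.Int.floordiv M 3;
     let ans := if m1 then ans + 1 else ans;
     let ans := if m2 then ans + 1 else ans;
     let ans := if PySem.Int.mod M 3 == 0 && m1 && m2 then ans - 1 else ans;
     if PySem.Int.mod M 3 == 1 && !(M2 + 1 == M) && !one && m1 then ans - 1 else ans)
    =
    (let extras : Int := (if m1 then 1 else 0) + (if m2 then 1 else 0);
     let ans := PySem.Int.floordiv M 3 + extras;
     if PySem.Int.mod M 3 == 0 then (if extras == 2 then ans - 1 else ans)
     else if PySem.Int.mod M 3 == 1 && !one && !(M2 + 1 == M) then ans - 1 else ans) := by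
  by_cases h0 : PySem.Int.mod M 3 = 0 <;> by_cases h1 : PySem.Int.mod M 3 = 1 <;>
    cases m1 <;> cases m2 <;> cases one <;> simp_all <;> omega

-- ===== VERDICT (by name: the statement is the Claim_ definition above) =====
theorem getMinProblemCount_spec : Claim_equal_getMinProblemCount := by
  intro N S _
  unfold Spec_getMinProblemCount
  simp only [getMinProblemCount, getMinProblemCount_alt,
    pvScanA _ (PySem.Set.nodup_ofList S), pvTop_sorted, pvTop2_sorted]
  rw [pvResidues, pvResidues, pvContainsOne]
  exact pvFinal (pvMx (PySem.Set.ofList S))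
    (pvMx ((PySem.Set.ofList S).filter (fun a => decide (a < pvMx (PySem.Set.ofList S)))))
    ((PySem.Set.ofList S).any (fun a => a == 1))
    ((PySem.Set.ofList S).any (fun a => PySem.Int.mod a 3 == 1))
    ((PySem.Set.ofList S).any (fun a => PySem.Int.mod a 3 == 2))
    (fun h => pvM1 _ h)
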